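-- pv_equiv track=rewrite | github.com/BogaertN/echo-forge | agents/opponent.py | _generate_alternative_interpretations
-- ===== SOURCE A (Python) =====
-- from typing import Dict, List, Optional, Any, Tuple
--
-- def _generate_alternative_interpretations(argument: str) -> List[str]:
--     """Generate alternative ways to interpret the argument"""
--     alternatives = []
--
--     # If argument claims benefits, consider costs
--     if any(word in argument.lower() for word in ["benefit", "advantage", "improve", "better"]):
--         alternatives.append("Focus on hidden costs and unintended consequences")
--
--     # If argument uses causation, consider correlation
--     if any(word in argument.lower() for word in ["causes", "leads to", "results in"]):
--         alternatives.append("Relationship may be correlational rather than causal")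
--
--     # If argument generalizes, consider specificity
--     if any(word in argument.lower() for word in ["all", "every", "always", "never"]):
--         alternatives.append("Consider exceptions and specific contexts where this doesn't apply")
--
--     # If argument assumes single cause, consider multiple factors
--     if "because" in argument.lower():
--         alternatives.append("Multiple factors likely contribute to this outcome")
--
--     return alternatives[:3]  # Limit to top 3 alternatives
-- ===== SOURCE B (Python) =====
-- _KEYWORD_RULE = {
--     "benefit": 0, "advantage": 0, "improve": 0, "better": 0,
--     "causes": 1, "leads to": 1, "results in": 1,
--     "all": 2, "every": 2, "always": 2, "never": 2,
--     "because": 3,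
-- }
--
-- _MESSAGES = [
--     "Focus on hidden costs and unintended consequences",
--     "Relationship may be correlational rather than causal",
--     "Consider exceptions and specific contexts where this doesn't apply",
--     "Multiple factors likely contribute to this outcome",
-- ]
--
-- def _generate_alternative_interpretations(argument: str):
--     """Single left-to-right scan of the text: at each position, try every
--     keyword of a keyword->rule table and record which rules fired; then
--     emit the messages of the fired rules in rule order, capped at 3."""
--     low = argument.lower()
--     hits = set()
--     for i in range(len(low)):
--         for kw, rule in _KEYWORD_RULE.items():
--             if rule not in hits and low.startswith(kw, i):
--                 hits.add(rule)
--     return [_MESSAGES[r] for r in range(4) if r in hits][:3]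
-- ===== Notes on version B (the rewrite author's own statement) =====
-- stated objective: alternative
-- what changed: Replaces A's four independent substring searches (one 'word in text' scan per keyword) by a single left-to-right scan of the lowercased text that, at each position, matches the keywords of a keyword-to-rule-id table, accumulates the set of fired rule ids, and finally emits the fired rules' messages in rule order capped at 3.
import Mathlib
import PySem

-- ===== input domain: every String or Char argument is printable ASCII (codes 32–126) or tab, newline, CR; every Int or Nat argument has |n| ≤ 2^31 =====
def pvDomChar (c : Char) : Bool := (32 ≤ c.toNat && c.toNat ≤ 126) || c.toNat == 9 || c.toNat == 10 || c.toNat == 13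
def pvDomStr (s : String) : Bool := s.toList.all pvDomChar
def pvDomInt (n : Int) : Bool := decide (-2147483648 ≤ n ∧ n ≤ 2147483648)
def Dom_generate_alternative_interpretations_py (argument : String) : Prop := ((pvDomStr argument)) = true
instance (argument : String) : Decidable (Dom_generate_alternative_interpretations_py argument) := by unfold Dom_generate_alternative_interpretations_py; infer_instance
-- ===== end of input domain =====

-- B replaces A's four per-rule substring searches by ONE left-to-right scan of the text driven by a keyword->rule table (alternative algorithm; equivalence is proved, not speed).


-- ===== PORT A =====
def generate_alternative_interpretations_py (argument : String) : List String :=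
  let alternatives : List String := []
  let alternatives := if ["benefit", "advantage", "improve", "better"].any
      (fun w => PySem.Str.isIn w (PySem.Str.lower argument))
    then alternatives ++ ["Focus on hidden costs and unintended consequences"] else alternatives
  let alternatives := if ["causes", "leads to", "results in"].any
      (fun w => PySem.Str.isIn w (PySem.Str.lower argument))
    then alternatives ++ ["Relationship may be correlational rather than causal"] else alternatives
  let alternatives := if ["all", "every", "always", "never"].any
      (fun w => PySem.Str.isIn w (PySem.Str.lower argument))
    then alternatives ++ ["Consider exceptions and specific contexts where this doesn't apply"] else alternatives
  let alternatives := if PySem.Str.isIn "because" (PySem.Str.lower argument)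
    then alternatives ++ ["Multiple factors likely contribute to this outcome"] else alternatives
  PySem.List.slice alternatives none (some 3)

-- ===== PORT B =====
-- B: the keyword -> rule-id table (dict _KEYWORD_RULE, insertion order) and the message table.
def pvKeywordRule : List (List Char × Int) :=
  [("benefit".toList, 0), ("advantage".toList, 0), ("improve".toList, 0), ("better".toList, 0),
   ("causes".toList, 1), ("leads to".toList, 1), ("results in".toList, 1),
   ("all".toList, 2), ("every".toList, 2), ("always".toList, 2), ("never".toList, 2),
   ("because".toList, 3)]

def pvMessages : List String :=
  ["Focus on hidden costs and unintended consequences",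
   "Relationship may be correlational rather than causal",
   "Consider exceptions and specific contexts where this doesn't apply",
   "Multiple factors likely contribute to this outcome"]

-- inner loop: try every table keyword at the current position (suffix s)
def pvStep (s : List Char) (hits : PySem.Set Int) : PySem.Set Int :=
  pvKeywordRule.foldl
    (fun h p => if !PySem.Set.contains h p.2 && p.1.isPrefixOf s then PySem.Set.add h p.2 else h)
    hits

-- outer loop: for i in range(len(low)) — one pass over the positions of the text
def pvScan : List Char → PySem.Set Int → PySem.Set Int
  | [], hits => hits
  | c :: rest, hits => pvScan rest (pvStep (c :: rest) hits)

def generate_alternative_interpretations_py_alt (argument : String) : List String :=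
  let low := (PySem.Str.lower argument).toList
  let hits := pvScan low PySem.Set.empty
  (((PySem.List.pyRange 0 4 1).filter (fun r => PySem.Set.contains hits r)).map
      (fun r => PySem.List.pyGetD pvMessages r "")).take 3

-- ===== PRECONDITION & SPEC =====
def Spec_generate_alternative_interpretations_py (argument : String) (out : List String) : Prop := out = generate_alternative_interpretations_py_alt argument
instance (argument : String) (out : List String) : Decidable (Spec_generate_alternative_interpretations_py argument out) := by unfold Spec_generate_alternative_interpretations_py; infer_instance

-- ===== CLAIM (what is proved, stated in full; the proofs are below) =====
def Claim_equal_generate_alternative_interpretations_py : Prop := ∀ (argument : String), Dom_generate_alternative_interpretations_py argument → Spec_generate_alternative_interpretations_py argument (generate_alternative_interpretations_py argument)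

-- ===== LEMMAS AND PROOFS =====

-- membership in the inner fold over any keyword table
lemma pv_mem_fold (kws : List (List Char × Int)) (s : List Char) (hits : PySem.Set Int) (r : Int) :
    r ∈ kws.foldl
        (fun h p => if !PySem.Set.contains h p.2 && p.1.isPrefixOf s then PySem.Set.add h p.2 else h)
        hits ↔
      r ∈ hits ∨ ∃ p ∈ kws, p.2 = r ∧ p.1 <+: s := by
  induction kws generalizing hits with
  | nil => simp
  | cons q t ih =>
    simp only [List.foldl_cons, List.mem_cons]
    by_cases hc : (!PySem.Set.contains hits q.2 && q.1.isPrefixOf s) = true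
    · rw [if_pos hc, ih]
      have hpre : q.1 <+: s := List.isPrefixOf_iff_prefix.mp (by
        simp only [Bool.and_eq_true] at hc; exact hc.2)
      simp only [PySem.Set.mem_add]
      constructor
      · rintro ((h | h) | ⟨p, hp, h1, h2⟩)
        · exact Or.inl h
        · exact Or.inr ⟨q, Or.inl rfl, h.symm, hpre⟩
        · exact Or.inr ⟨p, Or.inr hp, h1, h2⟩
      · rintro (h | ⟨p, (rfl | hp), h1, h2⟩)
        · exact Or.inl (Or.inl h)
        · exact Or.inl (Or.inr h1.symm)
        · exact Or.inr ⟨p, hp, h1, h2⟩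
    · rw [if_neg hc, ih]
      simp only [Bool.and_eq_true, Bool.not_eq_true', not_and] at hc
      constructor
      · rintro (h | ⟨p, hp, h1, h2⟩)
        · exact Or.inl h
        · exact Or.inr ⟨p, Or.inr hp, h1, h2⟩
      · rintro (h | ⟨p, (rfl | hp), h1, h2⟩)
        · exact Or.inl h
        · -- the guard failed: either p.2 was already in hits, or p.1 is not a prefix
          by_cases hmem : PySem.Set.contains hits p.2 = true
          · exact Or.inl (h1 ▸ (PySem.Set.contains_iff hits p.2).mp hmem)
          · exact absurd (List.isPrefixOf_iff_prefix.mpr h2)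
              (by simpa using hc (by simpa using hmem))
        · exact Or.inr ⟨p, hp, h1, h2⟩

lemma pv_kw_ne_nil : ∀ p ∈ pvKeywordRule, p.1 ≠ [] := by decide

-- membership after the full scan: a rule fired iff one of its keywords is an infix of the text
lemma pv_mem_scan (s : List Char) (hits : PySem.Set Int) (r : Int) :
    r ∈ pvScan s hits ↔ r ∈ hits ∨ ∃ p ∈ pvKeywordRule, p.2 = r ∧ p.1 <:+: s := by
  induction s generalizing hits with
  | nil =>
    simp only [pvScan, List.infix_nil]
    constructor
    · exact Or.inl
    · rintro (h | ⟨p, hp, _, h2⟩)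
      · exact h
      · exact absurd h2 (pv_kw_ne_nil p hp)
  | cons c rest ih =>
    rw [pvScan, ih, pvStep, pv_mem_fold]
    constructor
    · rintro ((h | ⟨p, hp, h1, h2⟩) | ⟨p, hp, h1, h2⟩)
      · exact Or.inl h
      · exact Or.inr ⟨p, hp, h1, List.infix_cons_iff.mpr (Or.inl h2)⟩
      · exact Or.inr ⟨p, hp, h1, List.infix_cons_iff.mpr (Or.inr h2)⟩
    · rintro (h | ⟨p, hp, h1, h2⟩)
      · exact Or.inl (Or.inl h)
      · rcases List.infix_cons_iff.mp h2 with h2 | h2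
        · exact Or.inl (Or.inr ⟨p, hp, h1, h2⟩)
        · exact Or.inr ⟨p, hp, h1, h2⟩

-- the fired-rule test, per rule id, equals A's any-keyword substring test
lemma pv_hit0 (s : String) :
    PySem.Set.contains (pvScan (PySem.Str.lower s).toList PySem.Set.empty) 0
      = (["benefit", "advantage", "improve", "better"].any
          (fun w => PySem.Str.isIn w (PySem.Str.lower s))) := by
  rw [Bool.eq_iff_iff, PySem.Set.contains_iff, pv_mem_scan]
  simp [PySem.Set.empty, pvKeywordRule, PySem.Chars.isIn_iff_infix]

lemma pv_hit1 (s : String) :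
    PySem.Set.contains (pvScan (PySem.Str.lower s).toList PySem.Set.empty) 1
      = (["causes", "leads to", "results in"].any
          (fun w => PySem.Str.isIn w (PySem.Str.lower s))) := by
  rw [Bool.eq_iff_iff, PySem.Set.contains_iff, pv_mem_scan]
  simp [PySem.Set.empty, pvKeywordRule, PySem.Chars.isIn_iff_infix]

lemma pv_hit2 (s : String) :
    PySem.Set.contains (pvScan (PySem.Str.lower s).toList PySem.Set.empty) 2
      = (["all", "every", "always", "never"].any
          (fun w => PySem.Str.isIn w (PySem.Str.lower s))) := by
  rw [Bool.eq_iff_iff, PySem.Set.contains_iff, pv_mem_scan]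
  simp [PySem.Set.empty, pvKeywordRule, PySem.Chars.isIn_iff_infix]

lemma pv_hit3 (s : String) :
    PySem.Set.contains (pvScan (PySem.Str.lower s).toList PySem.Set.empty) 3
      = PySem.Str.isIn "because" (PySem.Str.lower s) := by
  rw [Bool.eq_iff_iff, PySem.Set.contains_iff, pv_mem_scan]
  simp [PySem.Set.empty, pvKeywordRule, PySem.Chars.isIn_iff_infix]

-- ===== VERDICT (by name: the statement is the Claim_ definition above) =====
theorem generate_alternative_interpretations_py_spec : Claim_equal_generate_alternative_interpretations_py := by
  intro argument _
  unfold Spec_generate_alternative_interpretations_py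
  unfold generate_alternative_interpretations_py generate_alternative_interpretations_py_alt
  dsimp only
  have hrange : PySem.List.pyRange 0 4 1 = [0, 1, 2, 3] := by decide
  rw [hrange]
  simp only [List.filter_cons, List.filter_nil, pv_hit0, pv_hit1, pv_hit2, pv_hit3]
  cases (["benefit", "advantage", "improve", "better"] : List String).any
      (fun w => PySem.Str.isIn w (PySem.Str.lower argument)) <;>
    cases (["causes", "leads to", "results in"] : List String).any
      (fun w => PySem.Str.isIn w (PySem.Str.lower argument)) <;>
    cases (["all", "every", "always", "never"] : List String).any
      (fun w => PySem.Str.isIn w (PySem.Str.lower argument)) <;>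
    cases PySem.Str.isIn "because" (PySem.Str.lower argument) <;>
    rfl
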